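-- pv_equiv track=rewrite | github.com/christianebacani/Roadmap | Coding Challenges using Python and SQL/Code Wars Python Solved Problems/7 Kyu/adjacent_double_double_letters.py | adjacent_double_double_letters
-- ===== SOURCE A (Python) =====
-- def adjacent_double_double_letters(word: str) -> bool:
--     for i in range(1, len(word)):
--         try:
--             substring = word[i - 1] + word[i]
--             adjacent_substring = word[i + 1] + word[i + 2]
--
--             if (substring[0] == substring[1]) and (adjacent_substring[0] == adjacent_substring[1]):
--                 return True
--
--         except:
--             pass
--
--     return False
-- ===== SOURCE B (Python) =====
-- import re
--
-- def adjacent_double_double_letters(word: str) -> bool: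
--     # A single regex search: four consecutive characters xxyy.
--     # re.DOTALL so '.' also matches newlines, like A's direct char comparison.
--     return bool(re.search(r'(.)\1(.)\2', word, re.DOTALL))
-- ===== Notes on version B (the rewrite author's own statement) =====
-- stated objective: idiomatic
-- what changed: Replaced the index loop with try/except over string slicing by a single regex search for the pattern (.)\1(.)\2 (four consecutive characters xxyy).
import Mathlib
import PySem

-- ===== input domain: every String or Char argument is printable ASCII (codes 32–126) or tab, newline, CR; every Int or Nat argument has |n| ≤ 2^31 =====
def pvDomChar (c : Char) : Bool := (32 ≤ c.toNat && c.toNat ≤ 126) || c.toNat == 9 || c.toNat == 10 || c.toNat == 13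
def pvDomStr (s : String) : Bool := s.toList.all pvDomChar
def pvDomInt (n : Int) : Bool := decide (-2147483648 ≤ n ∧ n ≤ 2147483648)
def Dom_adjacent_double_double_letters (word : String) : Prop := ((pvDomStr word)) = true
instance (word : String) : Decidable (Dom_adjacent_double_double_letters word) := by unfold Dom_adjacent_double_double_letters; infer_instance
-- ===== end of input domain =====

-- B replaces A's index loop with try/except by a single regex search for (.)\1(.)\2
-- (ported as a sliding four-character window scan); same O(n) cost, more idiomatic.


-- ===== PORT A =====
-- A's loop 'for i in range(1, len(word))' with word[i-1..i+2]; the bare except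
-- turns any IndexError (i+1 or i+2 out of range) into 'pass'.
def pvLoopA (cs : List Char) : List Int → Bool
  | [] => false
  | i :: rest =>
    match PySem.List.pyGet? cs (i - 1), PySem.List.pyGet? cs i,
          PySem.List.pyGet? cs (i + 1), PySem.List.pyGet? cs (i + 2) with
    | some a, some b, some c, some d =>
        if a == b && c == d then true else pvLoopA cs rest
    | _, _, _, _ => pvLoopA cs rest   -- except: pass

def adjacent_double_double_letters (word : String) : Bool :=
  pvLoopA word.toList (PySem.List.pyRange 1 (PySem.Str.len word) 1)

-- ===== PORT B =====
-- Source B's re.search(r'(.)\1(.)\2', word, re.DOTALL): the regex engine's scan for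
-- a match at each successive start position, i.e. a sliding 4-char window.
def pvScanB : List Char → Bool
  | a :: b :: c :: d :: rest =>
      if a == b && c == d then true else pvScanB (b :: c :: d :: rest)
  | _ => false

def adjacent_double_double_letters_alt (word : String) : Bool :=
  pvScanB word.toList

-- ===== PRECONDITION & SPEC =====
def Spec_adjacent_double_double_letters (word : String) (out : Bool) : Prop := out = adjacent_double_double_letters_alt word
instance (word : String) (out : Bool) : Decidable (Spec_adjacent_double_double_letters word out) := by unfold Spec_adjacent_double_double_letters; infer_instance

-- ===== CLAIM (what is proved, stated in full; the proofs are below) =====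
def Claim_equal_adjacent_double_double_letters : Prop := ∀ (word : String), Dom_adjacent_double_double_letters word → Spec_adjacent_double_double_letters word (adjacent_double_double_letters word)

-- ===== LEMMAS AND PROOFS =====

theorem pvScanB_short (cs : List Char) (h : cs.length < 4) : pvScanB cs = false := by
  match cs, h with
  | [], _ => rfl
  | [_], _ => rfl
  | [_, _], _ => rfl
  | [_, _, _], _ => rfl

theorem pv_key (cs : List Char) (k : Nat) :
    pvLoopA cs (PySem.List.pyRange ((k : Int) + 1) (cs.length : Int) 1) = pvScanB (cs.drop k) := by
  by_cases hlt : (k : Int) + 1 < (cs.length : Int)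
  · rw [PySem.List.pyRange_one_cons hlt]
    have hk1 : k + 1 < cs.length := by exact_mod_cast hlt
    have e1 : (k : Int) + 1 - 1 = (k : Nat) := by omega
    have e2 : (k : Int) + 1 + 1 = ((k + 2 : Nat) : Int) := by omega
    have e3 : (k : Int) + 1 + 2 = ((k + 3 : Nat) : Int) := by omega
    have e4 : (k : Int) + 1 = ((k + 1 : Nat) : Int) := by omega
    have ih := pv_key cs (k + 1)
    have ih' : pvLoopA cs (PySem.List.pyRange ((k : Int) + 1 + 1) (cs.length : Int) 1)
        = pvScanB (cs.drop (k + 1)) := by rw [e2]; exact_mod_cast ih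
    have hdropk : cs.drop k = cs[k] :: cs.drop (k + 1) :=
      List.drop_eq_getElem_cons (by omega)
    have hdropk1 : cs.drop (k + 1) = cs[k + 1] :: cs.drop (k + 2) :=
      List.drop_eq_getElem_cons hk1
    by_cases h3 : k + 3 < cs.length
    · have hdropk2 : cs.drop (k + 2) = cs[k + 2] :: cs.drop (k + 3) :=
        List.drop_eq_getElem_cons (by omega)
      have hdropk3 : cs.drop (k + 3) = cs[k + 3] :: cs.drop (k + 4) :=
        List.drop_eq_getElem_cons (by omega)
      rw [pvLoopA, e1, e2, e3, e4]
      simp only [PySem.List.pyGet?_natCast,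
        List.getElem?_eq_getElem (show k < cs.length by omega),
        List.getElem?_eq_getElem (show k + 1 < cs.length by omega),
        List.getElem?_eq_getElem (show k + 2 < cs.length by omega),
        List.getElem?_eq_getElem (show k + 3 < cs.length by omega)]
      rw [hdropk, hdropk1, hdropk2, hdropk3, pvScanB]
      split_ifs with h
      · rfl
      · rw [← hdropk3, ← hdropk2, ← hdropk1, ← e2, ih']
    · -- word[i+2] out of range → except: pass; B's window also never reaches 4 chars
      rw [pvLoopA, e3]
      have : PySem.List.pyGet? cs ((k + 3 : Nat) : Int) = none := by
        rw [PySem.List.pyGet?_natCast, List.getElem?_eq_none (by omega)]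
      rw [this]
      have hA : pvLoopA cs (PySem.List.pyRange ((k : Int) + 1 + 1) (cs.length : Int) 1) = false := by
        rw [ih', pvScanB_short _ (by simp [List.length_drop]; omega)]
      rw [pvScanB_short _ (by simp [List.length_drop]; omega), ← hA]
      rcases PySem.List.pyGet? cs ((k:Int) + 1 - 1) with _ | a <;>
        rcases PySem.List.pyGet? cs ((k:Int) + 1) with _ | b <;>
        rcases PySem.List.pyGet? cs ((k:Int) + 1 + 1) with _ | c <;> rfl
  · rw [PySem.List.pyRange_one_eq_nil (by omega)]
    have : cs.length ≤ k + 1 := by exact_mod_cast not_lt.mp hlt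
    rw [pvScanB_short _ (by simp [List.length_drop]; omega)]
    rfl
termination_by cs.length - k

-- ===== VERDICT (by name: the statement is the Claim_ definition above) =====
theorem adjacent_double_double_letters_spec : Claim_equal_adjacent_double_double_letters := by
  intro word _
  show adjacent_double_double_letters word = adjacent_double_double_letters_alt word
  unfold adjacent_double_double_letters adjacent_double_double_letters_alt
  have := pv_key word.toList 0
  simpa [PySem.Str.len_eq] using this
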